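-- pv_equiv track=rewrite | github.com/lytenica/Zadachi | 5prime_number_of_divisors/solution.py | prime_number_of_divisors
-- ===== SOURCE A (Python) =====
-- def prime_number_of_divisors(n):
-- 	sum=0
-- 	for x in range(1,n+1):
-- 		if n%x==0:
-- 			sum=sum+1
--
-- 	if sum==2 or sum==3:
-- 		return True
-- 	else:
-- 		if sum%2==0 and sum%3==0:
-- 			return True
-- 		else:
-- 			return False
-- ===== SOURCE B (Python) =====
-- def prime_number_of_divisors(n):
--     # Count divisors in O(sqrt(n)) by pairing each divisor x <= sqrt(n) with n // x.
--     d = 0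
--     x = 1
--     while x * x <= n:
--         if n % x == 0:
--             d += 1 if x * x == n else 2
--         x += 1
--     return d == 2 or d == 3 or d % 6 == 0
-- ===== Notes on version B (the rewrite author's own statement) =====
-- stated objective: faster
-- what changed: Replaces the O(n) scan of all candidates 1..n with an O(sqrt(n)) loop that counts each divisor x up to sqrt(n) together with its cofactor n//x, and folds A's two final parity tests into a single modulo-six check.
import Mathlib
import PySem

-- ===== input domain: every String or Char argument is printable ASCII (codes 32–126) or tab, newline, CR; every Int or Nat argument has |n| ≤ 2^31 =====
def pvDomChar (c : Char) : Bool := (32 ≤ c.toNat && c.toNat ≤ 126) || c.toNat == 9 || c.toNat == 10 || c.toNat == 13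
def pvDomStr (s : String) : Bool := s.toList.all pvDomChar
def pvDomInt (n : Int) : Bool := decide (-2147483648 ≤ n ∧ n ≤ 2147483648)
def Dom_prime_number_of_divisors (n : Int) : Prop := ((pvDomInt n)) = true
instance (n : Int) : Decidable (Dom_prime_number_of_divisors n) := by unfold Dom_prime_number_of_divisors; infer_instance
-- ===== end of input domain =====

-- B counts divisors in O(sqrt n) by pairing each divisor x with n//x instead of A's O(n) scan;
-- equal return value on every int is proved below.

-- ===== PORT A =====
def prime_number_of_divisors (n : Int) : Bool :=
  let sum := (PySem.List.pyRange 1 (n+1) 1).foldl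
    (fun s x => if PySem.Int.mod n x == 0 then s + 1 else s) (0 : Int)
  if sum == 2 || sum == 3 then true
  else if PySem.Int.mod sum 2 == 0 && PySem.Int.mod sum 3 == 0 then true
  else false

-- ===== PORT B =====
-- the while loop of Source B: x counts up while x*x <= n, d accumulates the divisor count
def pvAltLoop (n x d : Int) : Int :=
  if x * x ≤ n then
    pvAltLoop n (x+1)
      (if PySem.Int.mod n x == 0 then d + (if x * x == n then 1 else 2) else d)
  else d
termination_by (n + 1 - x).toNat
decreasing_by
  have hxx : (0:Int) ≤ x * x := mul_self_nonneg x
  have hxn : x ≤ n := by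
    rcases (by omega : x ≤ 0 ∨ 0 < x) with h0 | h0
    · linarith
    · have h1 : x * 1 ≤ x * x := by
        exact mul_le_mul_of_nonneg_left h0 h0.le
      linarith
  omega

def prime_number_of_divisors_alt (n : Int) : Bool :=
  let d := pvAltLoop n 1 0
  d == 2 || d == 3 || PySem.Int.mod d 6 == 0

-- ===== PRECONDITION & SPEC =====
def Spec_prime_number_of_divisors (n : Int) (out : Bool) : Prop := out = prime_number_of_divisors_alt n
instance (n : Int) (out : Bool) : Decidable (Spec_prime_number_of_divisors n out) := by unfold Spec_prime_number_of_divisors; infer_instance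

-- ===== CLAIM (what is proved, stated in full; the proofs are below) =====
def Claim_equal_prime_number_of_divisors : Prop := ∀ (n : Int), Dom_prime_number_of_divisors n → Spec_prime_number_of_divisors n (prime_number_of_divisors n)

-- ===== LEMMAS AND PROOFS =====

-- counting fold = countP
lemma pv_foldl_count (p : Int → Bool) (l : List Int) (s : Int) :
    l.foldl (fun s x => if p x then s + 1 else s) s = s + l.countP p := by
  induction l generalizing s with
  | nil => simp
  | cons a t ih => by_cases h : p a <;> simp [List.countP_cons, h, ih] <;> ring

-- countP over List.range as a Finset card
lemma pv_countP_range (N : ℕ) (p : ℕ → Bool) :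
    (List.range N).countP p = ((Finset.range N).filter (fun k => p k = true)).card := by
  induction N with
  | zero => simp
  | succ m ih =>
    rw [List.range_succ, Finset.range_add_one, Finset.filter_insert, List.countP_append]
    by_cases h : p m
    · rw [if_pos h, Finset.card_insert_of_notMem (by simp)]
      simp [h, ih]
    · simp [h, ih]

-- the filtered shifted range is exactly the divisors
lemma pv_card_range_divisors (N : ℕ) (hN : 1 ≤ N) :
    ((Finset.range N).filter (fun k => decide ((k+1) ∣ N) = true)).card = N.divisors.card := by
  refine Finset.card_bij' (fun k _ => k + 1) (fun e _ => e - 1) ?_ ?_ ?_ ?_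
  · intro k hk
    simp only [Finset.mem_filter, Finset.mem_range, decide_eq_true_eq] at hk
    exact Nat.mem_divisors.mpr ⟨hk.2, by omega⟩
  · intro e he
    rw [Nat.mem_divisors] at he
    have h1 : 1 ≤ e := Nat.pos_of_dvd_of_pos he.1 (by omega)
    have h2 : e ≤ N := Nat.le_of_dvd (by omega) he.1
    simp only [Finset.mem_filter, Finset.mem_range, decide_eq_true_eq]
    exact ⟨by omega, by rw [Nat.sub_add_cancel h1]; exact he.1⟩
  · intro k _
    simp
  · intro e he
    rw [Nat.mem_divisors] at he
    have h1 : 1 ≤ e := Nat.pos_of_dvd_of_pos he.1 (by omega)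
    simp
    omega

-- pairing: as many divisors below sqrt as above
lemma pv_card_pair (N : ℕ) (hN : 1 ≤ N) :
    (N.divisors.filter (fun e => e * e < N)).card
      = (N.divisors.filter (fun e => N < e * e)).card := by
  refine Finset.card_bij' (fun e _ => N / e) (fun e _ => N / e) ?_ ?_ ?_ ?_
  · intro e he
    simp only [Finset.mem_filter, Nat.mem_divisors] at he ⊢
    obtain ⟨⟨hd, hne⟩, hlt⟩ := he
    obtain ⟨q, hq⟩ := hd
    have he1 : 0 < e := Nat.pos_of_dvd_of_pos ⟨q, hq⟩ (by omega)
    have hqd : N / e = q := by rw [hq]; exact Nat.mul_div_cancel_left q he1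
    have hq0 : 0 < q := by
      rcases Nat.eq_zero_or_pos q with h | h
      · subst h; omega
      · exact h
    have heq : e < q := by
      rw [hq] at hlt
      exact Nat.lt_of_mul_lt_mul_left hlt
    refine ⟨⟨⟨e, by rw [hqd, hq]; ring⟩, hne⟩, ?_⟩
    rw [hqd, hq]
    calc e * q < q * q := (Nat.mul_lt_mul_right hq0).mpr heq
    _ ≤ q * q := le_rfl
  · intro e he
    simp only [Finset.mem_filter, Nat.mem_divisors] at he ⊢
    obtain ⟨⟨hd, hne⟩, hgt⟩ := he
    obtain ⟨q, hq⟩ := hd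
    have he1 : 0 < e := Nat.pos_of_dvd_of_pos ⟨q, hq⟩ (by omega)
    have hqd : N / e = q := by rw [hq]; exact Nat.mul_div_cancel_left q he1
    have hq0 : 0 < q := by
      rcases Nat.eq_zero_or_pos q with h | h
      · subst h; omega
      · exact h
    have hqe : q < e := by
      by_contra hle
      push_neg at hle
      have : e * e ≤ e * q := Nat.mul_le_mul_left e hle
      omega
    refine ⟨⟨⟨e, by rw [hqd, hq]; ring⟩, hne⟩, ?_⟩
    rw [hqd, hq]
    calc q * q < q * e := (Nat.mul_lt_mul_left hq0).mpr hqe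
    _ = e * q := by ring
  · intro e he
    simp only [Finset.mem_filter, Nat.mem_divisors] at he
    exact Nat.div_div_self he.1.1 he.1.2
  · intro e he
    simp only [Finset.mem_filter, Nat.mem_divisors] at he
    exact Nat.div_div_self he.1.1 he.1.2

lemma pv_card_split (N : ℕ) (hN : 1 ≤ N) :
    N.divisors.card = 2 * (N.divisors.filter (fun e => e * e < N)).card
      + (N.divisors.filter (fun e => e * e = N)).card := by
  have h1 := Finset.filter_card_add_filter_neg_card_eq_card
    (s := N.divisors) (p := fun e => e * e < N)
  have h2 := Finset.filter_card_add_filter_neg_card_eq_card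
    (s := N.divisors.filter (fun e => ¬ e * e < N)) (p := fun e => e * e = N)
  rw [Finset.filter_filter, Finset.filter_filter] at h2
  have e1 : N.divisors.filter (fun e => ¬ e * e < N ∧ e * e = N)
      = N.divisors.filter (fun e => e * e = N) := by
    apply Finset.filter_congr; intro e _; constructor
    · exact fun h => h.2
    · exact fun h => ⟨by omega, h⟩
  have e2 : N.divisors.filter (fun e => ¬ e * e < N ∧ ¬ e * e = N)
      = N.divisors.filter (fun e => N < e * e) := by
    apply Finset.filter_congr; intro e _; constructor
    · exact fun h => by omega
    · exact fun h => ⟨by omega, by omega⟩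
  rw [e1, e2] at h2
  have hp := pv_card_pair N hN
  omega

-- dropping the smallest admissible index from a divisor filter
lemma pv_filter_step (N k : ℕ) (P : ℕ → Prop) [DecidablePred P] :
    (N.divisors.filter (fun e => k ≤ e ∧ P e)).card
      = (N.divisors.filter (fun e => k + 1 ≤ e ∧ P e)).card
        + (if k ∈ N.divisors ∧ P k then 1 else 0) := by
  by_cases hkP : k ∈ N.divisors ∧ P k
  · rw [if_pos hkP]
    have hins : (N.divisors.filter (fun e => k ≤ e ∧ P e))
        = insert k (N.divisors.filter (fun e => k + 1 ≤ e ∧ P e)) := by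
      ext e
      simp only [Finset.mem_filter, Finset.mem_insert]
      constructor
      · rintro ⟨he, hke, hPe⟩
        rcases Nat.eq_or_lt_of_le hke with h | h
        · exact Or.inl h.symm
        · exact Or.inr ⟨he, h, hPe⟩
      · rintro (rfl | ⟨he, hke, hPe⟩)
        · exact ⟨hkP.1, le_rfl, hkP.2⟩
        · exact ⟨he, by omega, hPe⟩
    rw [hins, Finset.card_insert_of_notMem (by simp only [Finset.mem_filter]; omega)]
  · rw [if_neg hkP, Nat.add_zero]
    congr 1
    apply Finset.filter_congr
    intro e he
    constructor
    · rintro ⟨hke, hPe⟩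
      rcases Nat.eq_or_lt_of_le hke with h | h
      · exact absurd ⟨h ▸ he, h ▸ hPe⟩ hkP
      · exact ⟨h, hPe⟩
    · rintro ⟨hke, hPe⟩
      exact ⟨by omega, hPe⟩

-- the B loop invariant
lemma pv_altLoop_inv (N : ℕ) (hN : 1 ≤ N) (M : ℕ) : ∀ (k : ℕ), N + 1 - k ≤ M → 1 ≤ k → ∀ (d : Int),
    pvAltLoop (N : Int) (k : Int) d
      = d + 2 * ((N.divisors.filter (fun e => k ≤ e ∧ e * e < N)).card : Int)
          + ((N.divisors.filter (fun e => k ≤ e ∧ e * e = N)).card : Int) := by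
  induction M with
  | zero =>
    intro k hkM hk d
    have hkN : N < k := by omega
    have hguard : ¬ ((k : Int) * (k : Int) ≤ (N : Int)) := by
      have : N < k * k := by
        calc N < k := hkN
        _ = k * 1 := (Nat.mul_one k).symm
        _ ≤ k * k := Nat.mul_le_mul_left k hk
      exact_mod_cast fun h => absurd (by exact_mod_cast h) (by omega)
    rw [pvAltLoop, if_neg hguard]
    have h1 : N.divisors.filter (fun e => k ≤ e ∧ e * e < N) = ∅ := by
      apply Finset.filter_false_of_mem
      intro e he
      have : e ≤ N := Nat.le_of_dvd (by omega) (Nat.mem_divisors.mp he).1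
      omega
    have h2 : N.divisors.filter (fun e => k ≤ e ∧ e * e = N) = ∅ := by
      apply Finset.filter_false_of_mem
      intro e he
      have : e ≤ N := Nat.le_of_dvd (by omega) (Nat.mem_divisors.mp he).1
      omega
    rw [h1, h2]
    simp
  | succ M ih =>
    intro k hkM hk d
    by_cases hkk : k * k ≤ N
    · have hkN : k ≤ N := le_trans (by calc k = k * 1 := (Nat.mul_one k).symm
        _ ≤ k * k := Nat.mul_le_mul_left k hk) hkk
      have hguard : ((k : Int) * (k : Int) ≤ (N : Int)) := by exact_mod_cast hkk
      rw [pvAltLoop, if_pos hguard]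
      have hcast : ((k : Int) + 1) = ((k + 1 : ℕ) : Int) := by push_cast; ring
      rw [hcast, ih (k + 1) (by omega) (by omega)]
      have hmod : (PySem.Int.mod (N : Int) (k : Int) == 0) = decide (k ∣ N) := by
        rw [show PySem.Int.mod (N : Int) (k : Int) = ((N % k : ℕ) : Int) from
          by exact_mod_cast PySem.Int.mod_natCast N k]
        by_cases h : k ∣ N
        · have h0 : N % k = 0 := Nat.mod_eq_zero_of_dvd h
          simp [h0, h]
        · have h0 : N % k ≠ 0 := by
            intro hc
            exact h (Nat.dvd_of_mod_eq_zero hc)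
          simp [h, h0]
          exact fun hc => h (by exact_mod_cast hc)
      have heqb : ((k : Int) * (k : Int) == (N : Int)) = decide (k * k = N) := by
        rw [show ((k : Int) * (k : Int)) = ((k * k : ℕ) : Int) from by push_cast; ring]
        by_cases h : k * k = N
        · simp [h]
        · simp [h]
          exact_mod_cast h
      rw [hmod, heqb]
      rw [pv_filter_step N k (fun e => e * e < N), pv_filter_step N k (fun e => e * e = N)]
      have hkdiv : (k ∈ N.divisors) ↔ k ∣ N := by
        rw [Nat.mem_divisors]
        exact ⟨fun h => h.1, fun h => ⟨h, by omega⟩⟩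
      by_cases hdvd : k ∣ N
      · by_cases heq : k * k = N
        · have hlt : ¬ k * k < N := by omega
          simp only [hkdiv, hdvd, heq, hlt, decide_true, if_true, and_true, and_false,
            if_false, lt_irrefl, iff_true, Finset.mem_filter]
          simp [hkdiv, hdvd]
          try push_cast
          try ring
        · have hlt : k * k < N := by omega
          simp only [hkdiv, hdvd, heq, decide_true, decide_false, if_true, if_false]
          simp [hkdiv, hdvd, hlt, heq]
          try push_cast
          try ring
      · simp [hkdiv, hdvd]
        try push_cast
        try ring
    · have hguard : ¬ ((k : Int) * (k : Int) ≤ (N : Int)) := by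
        intro h
        exact hkk (by exact_mod_cast h)
      rw [pvAltLoop, if_neg hguard]
      have h1 : N.divisors.filter (fun e => k ≤ e ∧ e * e < N) = ∅ := by
        apply Finset.filter_false_of_mem
        intro e he
        intro hc
        have : k * k ≤ e * e := Nat.mul_le_mul hc.1 hc.1
        omega
      have h2 : N.divisors.filter (fun e => k ≤ e ∧ e * e = N) = ∅ := by
        apply Finset.filter_false_of_mem
        intro e he
        intro hc
        have : k * k ≤ e * e := Nat.mul_le_mul hc.1 hc.1
        omega
      rw [h1, h2]
      simp

lemma pv_sum_eq (N : ℕ) (hN : 1 ≤ N) :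
    ((PySem.List.pyRange 1 ((N:Int)+1) 1).foldl
      (fun s x => if PySem.Int.mod (N:Int) x == 0 then s + 1 else s) (0 : Int))
      = (N.divisors.card : Int) := by
  rw [pv_foldl_count, zero_add, PySem.List.pyRange_one]
  rw [List.countP_map]
  have hlen : (((N : Int) + 1 - 1)).toNat = N := by omega
  rw [hlen]
  have hcongr : ∀ a ∈ List.range N,
      ((fun x => PySem.Int.mod (N : Int) x == 0) ∘ (fun k : ℕ => (1 : Int) + (k : Int))) a
        = (fun k => decide ((k + 1) ∣ N)) a := by
    intro a _
    simp only [Function.comp]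
    rw [show ((1 : Int) + (a : Int)) = ((1 + a : ℕ) : Int) from by push_cast; ring]
    rw [show PySem.Int.mod ((N : ℕ) : Int) ((1 + a : ℕ) : Int) = ((N % (1 + a) : ℕ) : Int) from
      by exact_mod_cast PySem.Int.mod_natCast N (1 + a)]
    by_cases h : (a + 1) ∣ N
    · have h0 : N % (1 + a) = 0 := Nat.mod_eq_zero_of_dvd (by rwa [Nat.add_comm])
      simp [h0, h]
    · have h0 : N % (1 + a) ≠ 0 := by
        intro hc
        exact h (by have := Nat.dvd_of_mod_eq_zero hc; rwa [Nat.add_comm] at this)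
      simp [h, h0]
      rw [show (1 : Int) + (a : Int) = ((a + 1 : ℕ) : Int) from by push_cast; ring]
      exact_mod_cast h
  rw [List.countP_congr (fun a ha => by rw [hcongr a ha]), pv_countP_range,
    pv_card_range_divisors N hN]

lemma pv_alt_eq (N : ℕ) (hN : 1 ≤ N) :
    pvAltLoop (N : Int) 1 0 = (N.divisors.card : Int) := by
  have h := pv_altLoop_inv N hN (N + 1) 1 (by omega) le_rfl 0
  simp only [Nat.cast_one, zero_add] at h
  have e1 : N.divisors.filter (fun e => 1 ≤ e ∧ e * e < N)
      = N.divisors.filter (fun e => e * e < N) := by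
    apply Finset.filter_congr
    intro e he
    have h1 : 1 ≤ e := Nat.pos_of_dvd_of_pos (Nat.mem_divisors.mp he).1 (by omega)
    exact ⟨fun hh => hh.2, fun hh => ⟨h1, hh⟩⟩
  have e2 : N.divisors.filter (fun e => 1 ≤ e ∧ e * e = N)
      = N.divisors.filter (fun e => e * e = N) := by
    apply Finset.filter_congr
    intro e he
    have h1 : 1 ≤ e := Nat.pos_of_dvd_of_pos (Nat.mem_divisors.mp he).1 (by omega)
    exact ⟨fun hh => hh.2, fun hh => ⟨h1, hh⟩⟩
  rw [e1, e2] at h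
  rw [h, pv_card_split N hN]
  push_cast
  ring

-- the final branch logic: A's (sum%2==0 and sum%3==0) is B's sum%6==0
lemma pv_out (C : ℕ) :
    (if ((C:Int) == 2 || (C:Int) == 3) then true
     else if (PySem.Int.mod (C:Int) 2 == 0 && PySem.Int.mod (C:Int) 3 == 0) then true else false)
    = (((C:Int) == 2 || (C:Int) == 3) || (PySem.Int.mod (C:Int) 6 == 0)) := by
  have g2 : PySem.Int.mod (C:Int) 2 = ((C % 2 : ℕ) : Int) := by exact_mod_cast PySem.Int.mod_natCast C 2
  have g3 : PySem.Int.mod (C:Int) 3 = ((C % 3 : ℕ) : Int) := by exact_mod_cast PySem.Int.mod_natCast C 3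
  have g6 : PySem.Int.mod (C:Int) 6 = ((C % 6 : ℕ) : Int) := by exact_mod_cast PySem.Int.mod_natCast C 6
  simp only [g2, g3, g6]
  by_cases h2 : C = 2
  · simp [h2]
  by_cases h3 : C = 3
  · simp [h3]
  have n2 : ((C:Int) == 2) = false := by simp; omega
  have n3 : ((C:Int) == 3) = false := by simp; omega
  simp only [n2, n3, Bool.false_or, Bool.or_self, Bool.false_eq_true, if_false]
  by_cases hm6 : C % 6 = 0
  · have a2 : C % 2 = 0 := by omega
    have a3 : C % 3 = 0 := by omega
    simp [hm6, a2, a3]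
  · by_cases a2 : C % 2 = 0
    · have a3 : ¬ (3:Int) ∣ (C:Int) := by omega
      simp [hm6, a2, a3, show ¬ ((C:Int) % 6 = 0) by omega]
    · have b2 : ¬ (2:Int) ∣ (C:Int) := by omega
      simp [b2, show ¬ ((C:Int) % 6 = 0) by omega]

-- ===== VERDICT (by name: the statement is the Claim_ definition above) =====
theorem prime_number_of_divisors_spec : Claim_equal_prime_number_of_divisors := by
  intro n _
  unfold Spec_prime_number_of_divisors prime_number_of_divisors prime_number_of_divisors_alt
  rcases (by omega : n ≤ 0 ∨ 0 < n) with hn | hn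
  · rw [PySem.List.pyRange_one_eq_nil (by omega)]
    rw [pvAltLoop]
    simp only [show ((1:Int) * 1 ≤ n) = False by simp; omega, if_false, List.foldl_nil]
    norm_num [PySem.Int.mod]
  · obtain ⟨N, rfl⟩ : ∃ N : ℕ, n = (N:Int) := ⟨n.toNat, by omega⟩
    have hN : 1 ≤ N := by exact_mod_cast hn
    rw [pv_sum_eq N hN, pv_alt_eq N hN]
    exact pv_out N.divisors.card
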